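-- pv_equiv track=rewrite | github.com/araya203/arkera | question2loss.py | highest_possible_loss
-- ===== SOURCE A (Python) =====
-- def highest_possible_loss(n):
--     if not n:
--         return 0
--
--     hi = n[0]
--     low = n[0]
--     hpl = 0
--
--     for num in n:
--         if num > hi:
--             hi = num
--         if num < hi:
--             low = num
--             hpl = min(hpl, num - hi)
--     return hpl
-- ===== SOURCE B (Python) =====
-- def highest_possible_loss(n):
--     if not n:
--         return 0
--     run = []
--     m = n[0]
--     for x in n:
--         if x > m:
--             m = x
--         run.append(m)
--     return min(x - m for x, m in zip(n, run))
-- ===== Notes on version B (the rewrite author's own statement) =====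
-- stated objective: alternative
-- what changed: Replaces A's fused single loop (running max + running min-difference in one state) by a two-phase decomposition: first materialise the prefix-maximum table, then a separate reduction takes the minimum of elementwise differences.
import Mathlib
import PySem

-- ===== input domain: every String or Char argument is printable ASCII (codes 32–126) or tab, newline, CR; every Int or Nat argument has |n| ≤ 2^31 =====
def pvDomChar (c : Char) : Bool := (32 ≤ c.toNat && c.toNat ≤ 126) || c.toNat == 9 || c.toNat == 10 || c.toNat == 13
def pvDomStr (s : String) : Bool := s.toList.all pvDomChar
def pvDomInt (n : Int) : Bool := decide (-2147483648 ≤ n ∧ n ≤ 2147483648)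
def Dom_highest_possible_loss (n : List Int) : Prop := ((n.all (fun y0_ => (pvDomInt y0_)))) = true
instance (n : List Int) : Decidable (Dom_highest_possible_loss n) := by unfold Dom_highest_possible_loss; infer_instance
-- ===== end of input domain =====

-- B replaces A's fused single loop by a two-phase decomposition (prefix-max table, then a
-- separate min-of-differences reduction); alternative structure, same O(n) cost.


-- ===== PORT A =====
-- A's loop state: (hi, low, hpl); 'low' is kept although the result never reads it.
def pvLossStep (s : Int × Int × Int) (num : Int) : Int × Int × Int :=
  let hi := if num > s.1 then num else s.1
  if num < hi then (hi, num, min s.2.2 (num - hi)) else (hi, s.2.1, s.2.2)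

def highest_possible_loss (n : List Int) : Int :=
  match n with
  | [] => 0
  | x :: _ => (n.foldl pvLossStep (x, x, 0)).2.2

-- ===== PORT B =====
-- prefix-maximum table (B's first loop: run.append of the running max)
def pvRunMax (m : Int) : List Int → List Int
  | [] => []
  | x :: xs =>
    let m' := if x > m then x else m
    m' :: pvRunMax m' xs

def highest_possible_loss_alt (n : List Int) : Int :=
  match n with
  | [] => 0
  | x :: _ =>
    let run := pvRunMax x n
    -- min over the nonempty generator (x - m for x, m in zip n run)
    match (n.zip run).map (fun p => p.1 - p.2) with
    | [] => 0    -- unreachable: n is nonempty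
    | d :: ds => ds.foldl min d

-- ===== PRECONDITION & SPEC =====
def Spec_highest_possible_loss (n : List Int) (out : Int) : Prop := out = highest_possible_loss_alt n
instance (n : List Int) (out : Int) : Decidable (Spec_highest_possible_loss n out) := by unfold Spec_highest_possible_loss; infer_instance

-- ===== CLAIM (what is proved, stated in full; the proofs are below) =====
def Claim_equal_highest_possible_loss : Prop := ∀ (n : List Int), Dom_highest_possible_loss n → Spec_highest_possible_loss n (highest_possible_loss n)

-- ===== LEMMAS AND PROOFS =====

-- Invariant lemma: starting from any state with hpl ≤ 0, A's fold computes the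
-- fold of min over the differences against the prefix maxima seeded at hi.
theorem pvLoss_fold_eq (xs : List Int) :
    ∀ (hi low hpl : Int), hpl ≤ 0 →
      (xs.foldl pvLossStep (hi, low, hpl)).2.2 =
        ((xs.zip (pvRunMax hi xs)).map (fun p => p.1 - p.2)).foldl min hpl := by
  induction xs with
  | nil => intro hi low hpl _; simp
  | cons x xs ih =>
    intro hi low hpl hle
    simp only [List.foldl_cons, pvRunMax, List.zip_cons_cons, List.map_cons]
    set m' : Int := if x > hi then x else hi with hm'
    have hxle : x ≤ m' := by rw [hm']; split_ifs with h <;> omega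
    have hstep : (pvLossStep (hi, low, hpl) x).1 = m' ∧
        (pvLossStep (hi, low, hpl) x).2.2 = min hpl (x - m') := by
      simp only [pvLossStep, ← hm']
      split_ifs with h
      · simp
      · have hx : x = m' := by rw [hm']; split_ifs with h2 <;> omega
        constructor
        · rfl
        · simp only []
          rw [hx]
          have : (m' : Int) - m' = 0 := by ring
          rw [this]
          exact (min_eq_left hle).symm
    obtain ⟨h1, h2⟩ := hstep
    have : pvLossStep (hi, low, hpl) x =
        ((pvLossStep (hi, low, hpl) x).1, (pvLossStep (hi, low, hpl) x).2.1,
         (pvLossStep (hi, low, hpl) x).2.2) := rfl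
    rw [this, h1, h2, ih m' _ (min hpl (x - m')) (le_trans (min_le_left _ _) hle)]

-- ===== VERDICT (by name: the statement is the Claim_ definition above) =====
theorem highest_possible_loss_spec : Claim_equal_highest_possible_loss := by
  intro n _
  unfold Spec_highest_possible_loss
  cases n with
  | nil => rfl
  | cons x xs =>
    simp only [highest_possible_loss, highest_possible_loss_alt]
    simp only [List.foldl_cons, pvRunMax, List.zip_cons_cons, List.map_cons]
    have hx : ¬ x > x := lt_irrefl x
    have hstep : pvLossStep (x, x, 0) x = (x, x, 0) := by
      simp [pvLossStep]
    have hsub : x - (if x > x then x else x) = 0 := by split_ifs <;> ring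
    rw [hstep, hsub, if_neg hx, pvLoss_fold_eq xs x x 0 le_rfl]
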